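-- pv_equiv track=rewrite | github.com/amir15bfk/TPRI | utils.py | check_query
-- ===== SOURCE A (Python) =====
-- def check_query(query):
--
--     if len(query)>1:
--         if query[0].upper() in ["AND","OR"]:
--             return False
--         if query[-1].upper() in ["NOT","AND","OR"]:
--             return False
--         for i,j in zip(query[:-1],query[1:]):
--             if i.upper()=="NOT":
--                 if j.upper() in ["NOT" ,"AND","OR"]:
--                     return False
--         if len(query)>2:
--             for j,k in zip(query[1:-1],query[2:]):
--                 if j.upper() in ["AND","OR"]:
--                     if k.upper() in ["AND","OR"]:
--                         return False
--     else:
--         if query[0].upper() in ["NOT","AND","OR"]: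
--             return False
--     return True
-- ===== SOURCE B (Python) =====
-- def _cat(tok):
--     u = tok.upper()
--     if u == "NOT":
--         return "N"
--     if u == "AND" or u == "OR":
--         return "B"
--     return "O"
--
--
-- def check_query(query):
--     cats = [_cat(t) for t in query]
--     if cats[0] == "B":
--         return False
--     prev = cats[0]
--     for c in cats[1:]:
--         if prev == "N" and c != "O":
--             return False
--         if prev == "B" and c == "B":
--             return False
--         prev = c
--     return prev != "N" and prev != "B"
-- ===== Notes on version B (the rewrite author's own statement) =====
-- stated objective: simpler
-- what changed: Replaced A's two zip pair-scans plus separate first/last/single-token guards by a single left-to-right finite-state walk over token categories (NOT/BINARY/OTHER) with one trailing-category check.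
import Mathlib
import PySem

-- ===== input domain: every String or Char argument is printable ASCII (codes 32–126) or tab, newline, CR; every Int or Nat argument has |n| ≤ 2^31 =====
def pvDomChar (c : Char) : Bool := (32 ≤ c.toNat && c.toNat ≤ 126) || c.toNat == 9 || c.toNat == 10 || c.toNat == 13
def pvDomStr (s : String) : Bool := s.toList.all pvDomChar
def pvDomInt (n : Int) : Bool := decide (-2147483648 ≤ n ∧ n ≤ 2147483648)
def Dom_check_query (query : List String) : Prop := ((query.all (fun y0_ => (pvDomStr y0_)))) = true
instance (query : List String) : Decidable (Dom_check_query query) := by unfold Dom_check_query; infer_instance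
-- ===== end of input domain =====

-- B is a simpler single-pass finite-state validator; the equivalence is about the return value only.

-- ===== PORT A =====
-- literal transliteration of A; 'for … return False' loops become List.any over the same zips
def check_query (query : List String) : Bool :=
  if query.length > 1 then
    match PySem.List.pyGet? query 0, PySem.List.pyGet? query (-1) with
    | some f, some l =>
      if decide (PySem.Str.upper f ∈ (["AND", "OR"] : List String)) then false
      else if decide (PySem.Str.upper l ∈ (["NOT", "AND", "OR"] : List String)) then false
      else if ((PySem.List.slice query none (some (-1))).zip
                 (PySem.List.slice query (some 1) none)).any
               (fun ij => PySem.Str.upper ij.1 == "NOT" &&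
                 decide (PySem.Str.upper ij.2 ∈ (["NOT", "AND", "OR"] : List String))) then false
      else if query.length > 2 then
        if ((PySem.List.slice query (some 1) (some (-1))).zip
              (PySem.List.slice query (some 2) none)).any
             (fun jk => decide (PySem.Str.upper jk.1 ∈ (["AND", "OR"] : List String)) &&
               decide (PySem.Str.upper jk.2 ∈ (["AND", "OR"] : List String))) then false
        else true
      else true
    | _, _ => false     -- IndexError: unreachable when query.length > 1
  else
    match PySem.List.pyGet? query 0 with
    | some f => !decide (PySem.Str.upper f ∈ (["NOT", "AND", "OR"] : List String))
    | none => false     -- IndexError on []; excluded by Pre_check_query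

-- ===== PORT B =====
inductive Cat : Type
  | N : Cat
  | B : Cat
  | O : Cat
deriving DecidableEq, Repr

-- B's helper _cat
def catOf (tok : String) : Cat :=
  let u := PySem.Str.upper tok
  if u = "NOT" then Cat.N
  else if u = "AND" ∨ u = "OR" then Cat.B
  else Cat.O

-- B's for-loop over cats[1:] with early returns, as structural recursion on the list
def goB (prev : Cat) : List Cat → Bool
  | [] => prev ≠ Cat.N && prev ≠ Cat.B
  | c :: cs =>
    if prev = Cat.N ∧ c ≠ Cat.O then false
    else if prev = Cat.B ∧ c = Cat.B then false
    else goB c cs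

def check_query_alt (query : List String) : Bool :=
  match query.map catOf with
  | [] => false     -- IndexError on []; excluded by Pre_check_query
  | c0 :: rest => if c0 = Cat.B then false else goB c0 rest

-- ===== PRECONDITION & SPEC =====
-- A raises IndexError on the empty list (query[0]); B raises there too, so [] is outside Pre_.
def Pre_check_query (query : List String) : Prop := query ≠ []
instance (query : List String) : Decidable (Pre_check_query query) := by unfold Pre_check_query; infer_instance
def pvWitness_check_query : List String := ["NOT", "cat", "AND", "dog"]

def Spec_check_query (query : List String) (out : Bool) : Prop := out = check_query_alt query
instance (query : List String) (out : Bool) : Decidable (Spec_check_query query out) := by unfold Spec_check_query; infer_instance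

-- ===== CLAIM (what is proved, stated in full; the proofs are below) =====
def Claim_equal_check_query : Prop := ∀ (query : List String), Dom_check_query query → Pre_check_query query → Spec_check_query query (check_query query)

-- ===== LEMMAS AND PROOFS =====

theorem mem2_iff (s : String) :
    (PySem.Str.upper s ∈ (["AND", "OR"] : List String)) ↔ catOf s = Cat.B := by
  simp only [catOf, List.mem_cons, List.not_mem_nil, or_false]
  by_cases h1 : PySem.Str.upper s = "NOT" <;>
    by_cases h2 : PySem.Str.upper s = "AND" <;>
      by_cases h3 : PySem.Str.upper s = "OR" <;>
        simp_all

theorem mem3_iff (s : String) :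
    (PySem.Str.upper s ∈ (["NOT", "AND", "OR"] : List String)) ↔ catOf s ≠ Cat.O := by
  simp only [catOf, List.mem_cons, List.not_mem_nil, or_false]
  by_cases h1 : PySem.Str.upper s = "NOT" <;>
    by_cases h2 : PySem.Str.upper s = "AND" <;>
      by_cases h3 : PySem.Str.upper s = "OR" <;>
        simp_all

theorem upper_not_iff (s : String) :
    (PySem.Str.upper s = "NOT") ↔ catOf s = Cat.N := by
  simp only [catOf]
  by_cases h1 : PySem.Str.upper s = "NOT" <;>
    by_cases h2 : PySem.Str.upper s = "AND" <;>
      by_cases h3 : PySem.Str.upper s = "OR" <;>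
        simp_all

-- the combined "bad transition" predicate of B's walk
def badT (i j : Cat) : Bool := (i = Cat.N ∧ j ≠ Cat.O) ∨ (i = Cat.B ∧ j = Cat.B)

theorem goB_eq (rest : List Cat) : ∀ c0 : Cat,
    goB c0 rest =
      ((!((c0 :: rest).zip rest).any (fun p => badT p.1 p.2)) &&
        decide (rest.getLastD c0 = Cat.O)) := by
  induction rest with
  | nil => intro c0; cases c0 <;> decide
  | cons c cs ih =>
    intro c0
    by_cases hN : c0 = Cat.N ∧ c ≠ Cat.O
    · have hb : badT c0 c = true := by simp only [badT, decide_eq_true_iff]; tauto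
      simp only [goB, if_pos hN, List.zip_cons_cons, List.any_cons, hb, Bool.true_or,
        Bool.not_true, Bool.false_and]
    · by_cases hB : c0 = Cat.B ∧ c = Cat.B
      · have hb : badT c0 c = true := by simp only [badT, decide_eq_true_iff]; tauto
        simp only [goB, if_neg hN, if_pos hB, List.zip_cons_cons, List.any_cons, hb,
          Bool.true_or, Bool.not_true, Bool.false_and]
      · have hb : badT c0 c = false := by
          simp only [badT, decide_eq_false_iff_not]; tauto
        simp only [goB, if_neg hN, if_neg hB, List.zip_cons_cons, List.any_cons, hb,
          Bool.false_or, ih c, List.getLastD_cons]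

theorem zip_dropLast_tail {α : Type} (xs : List α) :
    xs.dropLast.zip xs.tail = xs.zip xs.tail := by
  cases xs with
  | nil => rfl
  | cons a l =>
    induction l generalizing a with
    | nil => rfl
    | cons b m ih => simpa [List.dropLast_cons₂] using ih b

theorem zip_map_catOf (q : List String) :
    (q.map catOf).zip (q.map catOf).tail = (q.zip q.tail).map (Prod.map catOf catOf) := by
  rw [← List.map_tail, List.zip_map]

-- A's first pair-scan, transported to categories
theorem scan1_eq (q : List String) :
    ((q.zip q.tail).any
        (fun ij => PySem.Str.upper ij.1 == "NOT" &&
          decide (PySem.Str.upper ij.2 ∈ (["NOT", "AND", "OR"] : List String))))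
      = (((q.map catOf).zip (q.map catOf).tail).any
          (fun p => (p.1 = Cat.N) && (p.2 ≠ Cat.O))) := by
  rw [zip_map_catOf, List.any_map]
  have h1 : ∀ s : String, (PySem.Str.upper s == "NOT") = decide (catOf s = Cat.N) := by
    intro s
    rw [Bool.eq_iff_iff]
    simp only [beq_iff_eq, decide_eq_true_iff]
    exact upper_not_iff s
  have h2 : ∀ s : String,
      decide (PySem.Str.upper s ∈ (["NOT", "AND", "OR"] : List String))
        = decide (catOf s ≠ Cat.O) := by
    intro s
    rw [Bool.eq_iff_iff]
    simp only [decide_eq_true_iff]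
    exact mem3_iff s
  simp only [Function.comp_def, Prod.map_fst, Prod.map_snd, h1, h2]
  rfl

-- A's second pair-scan, transported to categories
theorem scan2_eq (q : List String) :
    ((q.zip q.tail).any
        (fun jk => decide (PySem.Str.upper jk.1 ∈ (["AND", "OR"] : List String)) &&
          decide (PySem.Str.upper jk.2 ∈ (["AND", "OR"] : List String))))
      = (((q.map catOf).zip (q.map catOf).tail).any
          (fun p => (p.1 = Cat.B) && (p.2 = Cat.B))) := by
  rw [zip_map_catOf, List.any_map]
  have h : ∀ s : String,
      decide (PySem.Str.upper s ∈ (["AND", "OR"] : List String))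
        = decide (catOf s = Cat.B) := by
    intro s
    rw [Bool.eq_iff_iff]
    simp only [decide_eq_true_iff]
    exact mem2_iff s
  simp only [Function.comp_def, Prod.map_fst, Prod.map_snd, h]
  rfl

theorem any_or_split {α : Type} (l : List α) (p q : α → Bool) :
    l.any (fun x => p x || q x) = (l.any p || l.any q) := by
  induction l with
  | nil => rfl
  | cons a t ih =>
    simp only [List.any_cons, ih]
    cases p a <;> cases q a <;> simp

theorem any_badT_split (l : List (Cat × Cat)) :
    l.any (fun p => badT p.1 p.2)
      = (l.any (fun p => (p.1 = Cat.N) && (p.2 ≠ Cat.O))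
          || l.any (fun p => (p.1 = Cat.B) && (p.2 = Cat.B))) := by
  have h : ∀ i j : Cat, badT i j
      = ((decide (i = Cat.N) && decide (j ≠ Cat.O)) || (decide (i = Cat.B) && decide (j = Cat.B))) := by
    intro i j; cases i <;> cases j <;> decide
  simp only [h]
  exact any_or_split l _ _

-- ===== VERDICT (by name: the statement is the Claim_ definition above) =====
theorem check_query_spec : Claim_equal_check_query := by
  intro query _ hpre
  unfold Spec_check_query
  match query with
  | [] => exact absurd rfl hpre
  | [t0] =>
    have e1 : decide (PySem.Str.upper t0 ∈ (["NOT", "AND", "OR"] : List String))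
        = decide (catOf t0 ≠ Cat.O) := by
      rw [Bool.eq_iff_iff]
      simp only [decide_eq_true_iff]
      exact mem3_iff t0
    simp only [check_query, check_query_alt, List.map_cons, List.map_nil,
      PySem.List.pyGet?_zero_cons]
    rw [if_neg (by simp)]
    simp only [e1]
    rcases h : catOf t0 with _ | _ | _ <;> simp [goB, h]
  | t0 :: t1 :: ts =>
    have hlen : (t0 :: t1 :: ts).length > 1 := by simp
    have hne : (t0 :: t1 :: ts) ≠ [] := by simp
    have hgl : (t0 :: t1 :: ts).getLast? = some ((t0 :: t1 :: ts).getLast hne) :=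
      List.getLast?_eq_some_getLast hne
    have hsl : PySem.List.slice (t0 :: t1 :: ts) (some 1) (some (-1))
        = (t1 :: ts).dropLast := by
      simp [PySem.List.slice, PySem.List.clampIdx, List.dropLast_eq_take]
      rw [if_neg (by omega)]
      omega
    have hsl2 : PySem.List.slice (t0 :: t1 :: ts) (some 2) none = (t1 :: ts).tail := by
      rw [show (2:Int) = ((2:Nat):Int) by norm_num, PySem.List.slice_from_natCast]
      simp
    simp only [check_query, PySem.List.pyGet?_zero_cons, PySem.List.pyGet?_neg_one,
      PySem.List.slice_to_neg_one, PySem.List.slice_from_one, hgl]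
    rw [if_pos hlen]
    simp only [hsl, hsl2, zip_dropLast_tail, scan1_eq, scan2_eq]
    simp only [check_query_alt, List.map_cons, List.tail_cons]
    rw [goB_eq]
    have key : (catOf t1 :: List.map catOf ts).getLastD (catOf t0)
        = catOf ((t0 :: t1 :: ts).getLast hne) := by
      have h1 : (catOf t0 :: catOf t1 :: List.map catOf ts).getLastD Cat.O
          = (catOf t1 :: List.map catOf ts).getLastD (catOf t0) := List.getLastD_cons
      have hcons : (catOf t0 :: catOf t1 :: List.map catOf ts).getLast?
          = some (catOf ((t0 :: t1 :: ts).getLast hne)) := by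
        rw [show (catOf t0 :: catOf t1 :: List.map catOf ts) = (t0 :: t1 :: ts).map catOf from
            by simp, List.getLast?_map, hgl]
        rfl
      rw [← h1, List.getLastD_eq_getLast?, hcons]
      rfl
    by_cases hB : catOf t0 = Cat.B
    · rw [if_pos (show decide (PySem.Str.upper t0 ∈ (["AND", "OR"] : List String)) = true by
          simp only [decide_eq_true_iff]; exact (mem2_iff t0).mpr hB), if_pos hB]
    · rw [if_neg (show ¬ decide (PySem.Str.upper t0 ∈ (["AND", "OR"] : List String)) = true by
          simp only [decide_eq_true_iff]
          exact fun h => hB ((mem2_iff t0).mp h)), if_neg hB]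
      by_cases hL : catOf ((t0 :: t1 :: ts).getLast hne) = Cat.O
      · -- last token OTHER
        have hlastD : (catOf t1 :: List.map catOf ts).getLastD (catOf t0) = Cat.O := by
          rw [key, hL]
        have hdec : decide ((catOf t1 :: List.map catOf ts).getLastD (catOf t0) = Cat.O)
            = true := decide_eq_true hlastD
        rw [if_neg (show ¬ decide (PySem.Str.upper ((t0 :: t1 :: ts).getLast hne)
              ∈ (["NOT", "AND", "OR"] : List String)) = true by
          simp only [decide_eq_true_iff]
          exact fun h => (mem3_iff _).mp h hL)]
        by_cases hS1 : (((catOf t0 :: catOf t1 :: List.map catOf ts).zip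
            (catOf t1 :: List.map catOf ts)).any
            (fun p => decide (p.1 = Cat.N) && decide (p.2 ≠ Cat.O))) = true
        · rw [if_pos hS1, any_badT_split, hS1, Bool.true_or, Bool.not_true, Bool.false_and]
        · rw [if_neg hS1]
          have hS1f : (((catOf t0 :: catOf t1 :: List.map catOf ts).zip
              (catOf t1 :: List.map catOf ts)).any
              (fun p => decide (p.1 = Cat.N) && decide (p.2 ≠ Cat.O))) = false := by
            cases hX : (((catOf t0 :: catOf t1 :: List.map catOf ts).zip
                (catOf t1 :: List.map catOf ts)).any
                (fun p => decide (p.1 = Cat.N) && decide (p.2 ≠ Cat.O))) with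
            | false => rfl
            | true => exact absurd hX hS1
          cases ts with
          | nil =>
            rw [if_neg (by simp)]
            have hO : catOf t1 = Cat.O := by
              simpa [List.getLastD] using hlastD
            have hbad : badT (catOf t0) (catOf t1) = false := by
              rw [hO]
              rcases h0 : catOf t0 with _ | _ | _
              · decide
              · exact absurd h0 hB
              · decide
            rw [show ((catOf t0 :: catOf t1 :: List.map catOf ([] : List String)).zip
                (catOf t1 :: List.map catOf ([] : List String))).any
                (fun p => badT p.1 p.2) = badT (catOf t0) (catOf t1) from by simp]
            rw [hbad, Bool.not_false, Bool.true_and, hdec]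
          | cons t2 ts' =>
            rw [if_pos (by simp)]
            have hfull : (((catOf t0 :: catOf t1 :: List.map catOf (t2 :: ts')).zip
                  (catOf t1 :: List.map catOf (t2 :: ts'))).any
                  (fun p => decide (p.1 = Cat.B) && decide (p.2 = Cat.B)))
                = (((catOf t1 :: List.map catOf (t2 :: ts')).zip
                  (List.map catOf (t2 :: ts'))).any
                  (fun p => decide (p.1 = Cat.B) && decide (p.2 = Cat.B))) := by
              have h0 : decide (catOf t0 = Cat.B) = false := by simp [hB]
              simp only [List.map_cons, List.zip_cons_cons, List.any_cons, h0,
                Bool.false_and, Bool.false_or]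
            by_cases hS2 : (((catOf t1 :: List.map catOf (t2 :: ts')).zip
                (List.map catOf (t2 :: ts'))).any
                (fun p => decide (p.1 = Cat.B) && decide (p.2 = Cat.B))) = true
            · rw [if_pos hS2, any_badT_split, hS1f, hfull, hS2, Bool.false_or,
                Bool.not_true, Bool.false_and]
            · rw [if_neg hS2]
              have hS2f : (((catOf t1 :: List.map catOf (t2 :: ts')).zip
                  (List.map catOf (t2 :: ts'))).any
                  (fun p => decide (p.1 = Cat.B) && decide (p.2 = Cat.B))) = false := by
                cases hX : (((catOf t1 :: List.map catOf (t2 :: ts')).zip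
                    (List.map catOf (t2 :: ts'))).any
                    (fun p => decide (p.1 = Cat.B) && decide (p.2 = Cat.B))) with
                | false => rfl
                | true => exact absurd hX hS2
              rw [any_badT_split, hS1f, hfull, hS2f, Bool.false_or,
                Bool.not_false, Bool.true_and, hdec]
      · -- last token NOT/AND/OR: both sides false
        rw [if_pos (show decide (PySem.Str.upper ((t0 :: t1 :: ts).getLast hne)
              ∈ (["NOT", "AND", "OR"] : List String)) = true by
          simp only [decide_eq_true_iff]; exact (mem3_iff _).mpr hL)]
        have hdec : decide ((catOf t1 :: List.map catOf ts).getLastD (catOf t0) = Cat.O)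
            = false := by
          simp only [decide_eq_false_iff_not, key]
          exact hL
        rw [hdec, Bool.and_false]
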